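-- pv_equiv track=rewrite | github.com/Mgs25/Edabit_Challenges | special_list.py | is_special_array
-- ===== SOURCE A (Python) =====
-- def is_special_array(lst):
-- 	flag = True
-- 	for i in range(0,len(lst),2):
-- 		if lst[i]%2 != 0:
-- 			flag = False
-- 	for j in range(1,len(lst),2):
-- 		if lst[j]%2 == 0:
-- 			flag = False
-- 	return flag
-- ===== SOURCE B (Python) =====
-- def is_special_array(lst):
--     return all(x % 2 == i % 2 for i, x in enumerate(lst))
-- ===== Notes on version B (the rewrite author's own statement) =====
-- stated objective: simpler
-- what changed: Replaces A's two index-parity-split passes (even indices then odd indices, each flipping a flag) with a single short-circuiting pass over enumerate checking that each value's parity equals its index's parity.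
import Mathlib
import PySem

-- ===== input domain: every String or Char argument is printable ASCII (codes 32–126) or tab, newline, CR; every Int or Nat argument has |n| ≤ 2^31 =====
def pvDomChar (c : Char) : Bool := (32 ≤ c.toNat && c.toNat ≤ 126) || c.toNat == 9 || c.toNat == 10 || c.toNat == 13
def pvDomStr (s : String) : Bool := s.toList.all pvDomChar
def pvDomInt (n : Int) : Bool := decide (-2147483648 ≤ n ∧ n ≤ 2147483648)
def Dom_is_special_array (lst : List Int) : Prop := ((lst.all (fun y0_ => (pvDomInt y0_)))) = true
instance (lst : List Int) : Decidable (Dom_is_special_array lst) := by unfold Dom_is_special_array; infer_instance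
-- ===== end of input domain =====

-- B replaces A's two index-parity-split flag loops with one pass checking value parity = index parity; objective: simpler.

-- ===== PORT A =====
def is_special_array (lst : List Int) : Bool :=
  -- flag = True; first loop over range(0, len, 2); second loop over range(1, len, 2)
  (PySem.List.pyRange 1 (lst.length : Int) 2).foldl
    (fun flag j => if PySem.Int.mod (PySem.List.pyGetD lst j 0) 2 = 0 then false else flag)
    ((PySem.List.pyRange 0 (lst.length : Int) 2).foldl
      (fun flag i => if PySem.Int.mod (PySem.List.pyGetD lst i 0) 2 ≠ 0 then false else flag) true)

-- ===== PORT B =====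
def is_special_array_alt (lst : List Int) : Bool :=
  (PySem.List.enumerate lst 0).all
    (fun p => PySem.Int.mod p.2 2 == PySem.Int.mod p.1 2)

-- ===== PRECONDITION & SPEC =====
def Spec_is_special_array (lst : List Int) (out : Bool) : Prop := out = is_special_array_alt lst
instance (lst : List Int) (out : Bool) : Decidable (Spec_is_special_array lst out) := by unfold Spec_is_special_array; infer_instance

-- ===== CLAIM (what is proved, stated in full; the proofs are below) =====
def Claim_equal_is_special_array : Prop := ∀ (lst : List Int), Dom_is_special_array lst → Spec_is_special_array lst (is_special_array lst)

-- ===== LEMMAS AND PROOFS =====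

-- A's loop shape: a flag that only ever drops to false
theorem foldl_flag (P : Int → Prop) [DecidablePred P] (l : List Int) (b : Bool) :
    l.foldl (fun f i => if P i then false else f) b = (b && l.all (fun i => decide (¬ P i))) := by
  induction l generalizing b with
  | nil => simp
  | cons x xs ih =>
    rw [List.foldl_cons, List.all_cons]
    by_cases h : P x
    · rw [if_pos h, ih]; simp [h]
    · rw [if_neg h, ih]; simp [h]

theorem is_special_array_spec : Claim_equal_is_special_array := by
  intro lst _
  unfold Spec_is_special_array is_special_array is_special_array_alt
  rw [foldl_flag (P := fun j => PySem.Int.mod (PySem.List.pyGetD lst j 0) 2 = 0),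
      foldl_flag (P := fun i => PySem.Int.mod (PySem.List.pyGetD lst i 0) 2 ≠ 0)]
  rw [Bool.eq_iff_iff]
  have hme : ∀ a : Int, PySem.Int.mod a 2 = a % 2 :=
    fun a => PySem.Int.mod_eq_emod_of_pos (by norm_num)
  simp only [Bool.and_eq_true, Bool.true_and, List.all_eq_true,
    PySem.List.mem_pyRange_iff_of_pos (by norm_num : (0:Int) < 2),
    PySem.List.mem_enumerate_iff, decide_eq_true_eq, beq_iff_eq, hme]
  constructor
  · rintro ⟨h0, h1⟩ p ⟨k, hk, rfl⟩
    have hk0 : (0:Int) ≤ (k:Int) := by positivity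
    have hklt : ((k:Int)) < (lst.length : Int) := by exact_mod_cast hk
    rcases Int.even_or_odd (k : Int) with ⟨m, hm⟩ | ⟨m, hm⟩
    · have := h0 (k : Int) ⟨hk0, hklt, by omega⟩
      rw [PySem.List.pyGetD_eq_getElem lst 0 hk0 hklt] at this
      simp only [Int.toNat_natCast] at this
      omega
    · have := h1 (k : Int) ⟨by omega, hklt, by omega⟩
      rw [PySem.List.pyGetD_eq_getElem lst 0 hk0 hklt] at this
      simp only [Int.toNat_natCast] at this
      omega
  · intro h
    constructor
    · rintro i ⟨hi0, hilt, hdvd⟩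
      have := h ((i, lst[i.toNat]'(by omega)) : Int × Int)
        ⟨i.toNat, by omega, by simp [Int.toNat_of_nonneg hi0]⟩
      simp only at this
      rw [PySem.List.pyGetD_eq_getElem lst 0 hi0 hilt]
      have hcast : ((i.toNat : Int)) = i := Int.toNat_of_nonneg hi0
      omega
    · rintro j ⟨hj1, hjlt, hdvd⟩
      have hj0 : (0:Int) ≤ j := by omega
      have := h ((j, lst[j.toNat]'(by omega)) : Int × Int)
        ⟨j.toNat, by omega, by simp [Int.toNat_of_nonneg hj0]⟩
      simp only at this
      rw [PySem.List.pyGetD_eq_getElem lst 0 hj0 hjlt]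
      have hcast : ((j.toNat : Int)) = j := Int.toNat_of_nonneg hj0
      omega
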